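-- pv_equiv track=rewrite | github.com/dsfdsf34/ViberSpamerPy | LnksChkName.py | get_rows_per_thread
-- ===== SOURCE A (Python) =====
-- def get_rows_per_thread(start_row, end_row, num_threads):
--     """Разделение строк между потоками"""
--     total_rows = end_row - start_row + 1
--     rows_per_thread = total_rows // num_threads
--     remaining_rows = total_rows % num_threads
--
--     thread_ranges = []
--     current_row = start_row
--
--     for i in range(num_threads):
--         end_row_for_thread = current_row + rows_per_thread - 1
--         if remaining_rows > 0:
--             end_row_for_thread += 1
--             remaining_rows -= 1
--         thread_ranges.append((current_row, end_row_for_thread))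
--         current_row = end_row_for_thread + 1
--
--     return thread_ranges
-- ===== SOURCE B (Python) =====
-- def get_rows_per_thread(start_row, end_row, num_threads):
--     """Each thread's contiguous range computed directly from its index (no running cursor)."""
--     total_rows = end_row - start_row + 1
--     q, r = divmod(total_rows, num_threads)
--     return [(start_row + i * q + min(i, r),
--              start_row + (i + 1) * q + min(i + 1, r) - 1)
--             for i in range(num_threads)]
-- ===== Notes on version B (the rewrite author's own statement) =====
-- stated objective: simpler
-- what changed: Replaced the stateful cursor/decrement loop with a single comprehension computing each thread's range in closed form from its index.
import Mathlib
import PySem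

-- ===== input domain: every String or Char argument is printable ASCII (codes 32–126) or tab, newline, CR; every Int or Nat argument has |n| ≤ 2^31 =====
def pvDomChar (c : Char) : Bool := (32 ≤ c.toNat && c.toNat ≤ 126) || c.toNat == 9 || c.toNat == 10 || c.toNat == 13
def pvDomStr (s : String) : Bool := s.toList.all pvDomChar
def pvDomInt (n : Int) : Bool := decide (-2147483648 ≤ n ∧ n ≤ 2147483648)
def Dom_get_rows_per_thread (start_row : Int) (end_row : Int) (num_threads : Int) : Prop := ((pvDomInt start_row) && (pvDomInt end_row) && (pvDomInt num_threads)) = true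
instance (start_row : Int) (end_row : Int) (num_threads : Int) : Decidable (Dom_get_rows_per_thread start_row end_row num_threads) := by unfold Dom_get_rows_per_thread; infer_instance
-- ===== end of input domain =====

-- B replaces A's running-cursor/decrement state machine by a closed-form range per thread index (simpler; same cost).


-- ===== PORT A =====
-- loop body of A: state = (thread_ranges, current_row, remaining_rows)
def pvStepA (rows_per_thread : Int) (st : List (Int × Int) × Int × Int) : List (Int × Int) × Int × Int :=
  let e0 := st.2.1 + rows_per_thread - 1
  let e := if st.2.2 > 0 then e0 + 1 else e0
  let rem := if st.2.2 > 0 then st.2.2 - 1 else st.2.2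
  (st.1 ++ [(st.2.1, e)], e + 1, rem)

def get_rows_per_thread (start_row : Int) (end_row : Int) (num_threads : Int) : List (Int × Int) :=
  let total_rows := end_row - start_row + 1
  let rows_per_thread := PySem.Int.floordiv total_rows num_threads
  let remaining_rows := PySem.Int.mod total_rows num_threads
  ((PySem.List.pyRange 0 num_threads 1).foldl
    (fun st _ => pvStepA rows_per_thread st)
    ([], start_row, remaining_rows)).1

-- ===== PORT B =====
-- B's per-index closed form for thread i's (start, end) pair
def pvCellB (s q r i : Int) : Int × Int :=
  (s + i * q + min i r, s + (i + 1) * q + min (i + 1) r - 1)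

def get_rows_per_thread_alt (start_row : Int) (end_row : Int) (num_threads : Int) : List (Int × Int) :=
  let total_rows := end_row - start_row + 1
  let q := PySem.Int.floordiv total_rows num_threads
  let r := PySem.Int.mod total_rows num_threads
  (PySem.List.pyRange 0 num_threads 1).map (pvCellB start_row q r)

-- ===== PRECONDITION & SPEC =====
-- A (and B) divide by num_threads: Python raises ZeroDivisionError iff num_threads = 0.
def Pre_get_rows_per_thread (start_row : Int) (end_row : Int) (num_threads : Int) : Prop := num_threads ≠ 0
instance (start_row : Int) (end_row : Int) (num_threads : Int) : Decidable (Pre_get_rows_per_thread start_row end_row num_threads) := by unfold Pre_get_rows_per_thread; infer_instance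
def pvWitness_get_rows_per_thread : Int × Int × Int := (1, 10, 3)

def Spec_get_rows_per_thread (start_row : Int) (end_row : Int) (num_threads : Int) (out : List (Int × Int)) : Prop := out = get_rows_per_thread_alt start_row end_row num_threads
instance (start_row : Int) (end_row : Int) (num_threads : Int) (out : List (Int × Int)) : Decidable (Spec_get_rows_per_thread start_row end_row num_threads out) := by unfold Spec_get_rows_per_thread; infer_instance

-- ===== CLAIM (what is proved, stated in full; the proofs are below) =====
def Claim_equal_get_rows_per_thread : Prop := ∀ (start_row : Int) (end_row : Int) (num_threads : Int), Dom_get_rows_per_thread start_row end_row num_threads → Pre_get_rows_per_thread start_row end_row num_threads → Spec_get_rows_per_thread start_row end_row num_threads (get_rows_per_thread start_row end_row num_threads)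

-- ===== LEMMAS AND PROOFS =====

-- Invariant: after thread index a, A's cursor is s + a*q + min a r and its remaining counter is r - min a r.
theorem pv_fold_eq (s q r : Int) :
    ∀ (n : Nat) (a b : Int) (acc : List (Int × Int)), 0 ≤ a → (b - a).toNat = n →
      ((PySem.List.pyRange a b 1).foldl (fun st _ => pvStepA q st)
        (acc, s + a * q + min a r, r - min a r)).1
      = acc ++ (PySem.List.pyRange a b 1).map (pvCellB s q r) := by
  intro n
  induction n with
  | zero =>
    intro a b acc ha hab
    rw [PySem.List.pyRange_one_eq_nil (by omega)]
    simp
  | succ m ih =>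
    intro a b acc ha hab
    rw [PySem.List.pyRange_one_cons (by omega)]
    simp only [List.foldl_cons, List.map_cons]
    have hstate : pvStepA q (acc, s + a * q + min a r, r - min a r)
        = (acc ++ [pvCellB s q r a], s + (a + 1) * q + min (a + 1) r, r - min (a + 1) r) := by
      simp only [pvStepA, pvCellB]
      by_cases hlt : a < r
      · have h1 : min a r = a := by omega
        have h2 : min (a + 1) r = a + 1 := by omega
        rw [h1, h2]
        simp only [if_pos (by omega : r - a > 0)]
        refine Prod.ext ?_ (Prod.ext ?_ ?_) <;> simp <;> ring_nf
      · have h1 : min a r = r := by omega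
        have h2 : min (a + 1) r = r := by omega
        rw [h1, h2]
        simp only [sub_self, if_neg (by omega : ¬ ((0:Int) > 0))]
        refine Prod.ext ?_ (Prod.ext ?_ ?_) <;> simp <;> ring_nf
    rw [hstate, ih (a + 1) b (acc ++ [pvCellB s q r a]) (by omega) (by omega)]
    simp

-- ===== VERDICT (by name: the statement is the Claim_ definition above) =====
theorem get_rows_per_thread_spec : Claim_equal_get_rows_per_thread := by
  intro s e n _ hn
  unfold Spec_get_rows_per_thread get_rows_per_thread get_rows_per_thread_alt
  by_cases hpos : 0 < n
  · have hr : 0 ≤ PySem.Int.mod (e - s + 1) n := by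
      rw [PySem.Int.mod_eq_emod_of_pos hpos]
      exact Int.emod_nonneg _ (by omega)
    have h0 : min (0 : Int) (PySem.Int.mod (e - s + 1) n) = 0 := by omega
    have := pv_fold_eq s (PySem.Int.floordiv (e - s + 1) n) (PySem.Int.mod (e - s + 1) n)
      n.toNat 0 n [] le_rfl (by omega)
    rw [h0] at this
    simpa using this
  · rw [PySem.List.pyRange_one_eq_nil (by omega)]
    simp
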